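-- pv_equiv track=rewrite | github.com/AmSach/sentience | src/skills/development/refactor_engine.py | _rename_in_line
-- ===== SOURCE A (Python) =====
-- def _rename_in_line(line: str, old_name: str, new_name: str) -> str:
--     """Rename identifier in a line, preserving strings/comments."""
--     # Pattern to match identifier not in strings
--     result = []
--     in_string = None
--     current = ""
--
--     i = 0
--     while i < len(line):
--         char = line[i]
--
--         # Handle string boundaries
--         if char in '"\'':
--             if in_string is None:
--                 in_string = char
--             elif in_string == char and (i == 0 or line[i-1] != '\\'):
--                 in_string = None
--             current += char
--         elif in_string:
--             current += char
--         else: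
--             # Not in string - check for identifier
--             if char.isalnum() or char == '_':
--                 # Collect full identifier
--                 j = i
--                 while j < len(line) and (line[j].isalnum() or line[j] == '_'):
--                     j += 1
--                 identifier = line[i:j]
--
--                 if identifier == old_name:
--                     result.append(current)
--                     current = new_name
--                     i = j - 1
--                 else:
--                     current += identifier
--                     i = j - 1
--             else:
--                 current += char
--
--         i += 1
--
--     result.append(current)
--     return ''.join(result)
-- ===== SOURCE B (Python) =====
-- def _step(line, i, state):
--     """Quote-state transition for position i (same rules as the original scanner)."""
--     ch = line[i]
--     if ch in '"\'':
--         if state is None: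
--             return ch
--         if state == ch and (i == 0 or line[i - 1] != '\\'):
--             return None
--     return state
--
--
-- def _rename_in_line(line: str, old_name: str, new_name: str) -> str:
--     """Rename identifier in a line, preserving strings/comments."""
--     n = len(line)
--     # Pass 1: mark every char that is a quote delimiter or inside a string.
--     protected = [False] * n
--     state = None
--     for i in range(n):
--         protected[i] = line[i] in '"\'' or state is not None
--         state = _step(line, i, state)
--     # Pass 2: copy protected chars verbatim; rewrite unprotected identifier runs.
--     out = []
--     i = 0
--     while i < n:
--         c = line[i]
--         if protected[i] or not (c.isalnum() or c == '_'):
--             out.append(c)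
--             i += 1
--         else:
--             j = i
--             while j < n and (line[j].isalnum() or line[j] == '_'):
--                 j += 1
--             run = line[i:j]
--             out.append(new_name if run == old_name else run)
--             i = j
--     return ''.join(out)
-- ===== Notes on version B (the rewrite author's own statement) =====
-- stated objective: alternative
-- what changed: Replaces A's single interleaved quote-state machine (which decides in-string vs identifier while building the output) by a two-pass decomposition: pass 1 precomputes a boolean 'protected' mask with the same quote/escape rules, pass 2 copies protected chars verbatim and rewrites unprotected maximal identifier runs.
import Mathlib
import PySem

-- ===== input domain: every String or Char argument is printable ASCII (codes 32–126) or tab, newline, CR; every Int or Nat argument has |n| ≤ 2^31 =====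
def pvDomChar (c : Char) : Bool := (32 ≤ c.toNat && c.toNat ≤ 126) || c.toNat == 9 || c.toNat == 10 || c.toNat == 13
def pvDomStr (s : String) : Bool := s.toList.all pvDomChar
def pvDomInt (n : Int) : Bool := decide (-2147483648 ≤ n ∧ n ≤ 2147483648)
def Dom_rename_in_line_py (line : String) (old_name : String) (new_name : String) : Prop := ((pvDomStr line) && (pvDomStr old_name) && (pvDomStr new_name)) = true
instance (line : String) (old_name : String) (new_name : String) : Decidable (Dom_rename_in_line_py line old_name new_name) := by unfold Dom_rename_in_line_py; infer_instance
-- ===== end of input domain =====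

-- B replaces A's single interleaved quote-state machine by a two-pass decomposition
-- (precompute a `protected` mask, then rewrite unprotected identifier runs); same cost,
-- objective: alternative structure.  Both are total; return values proved equal on Dom.
-- Loops are ported with a structural fuel counter (fuel = len suffices: the index
-- strictly increases each iteration), a totality guard only — both ports use it alike.

-- ===== PORT A =====
-- char in '"\''
def pvIsQuote (c : Char) : Bool := c = '"' || c = '\''
-- c.isalnum() or c == '_'
def pvIsIdent (c : Char) : Bool := PySem.Chars.isalnum c || c = '_'

-- the inner `while j < len(line) and (line[j].isalnum() or line[j]=='_')` loop:
-- first index ≥ j whose char is not an identifier char (identical inner loop in A and B)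
def pvIdentEnd (cs : List Char) (fuel : Nat) (j : Nat) : Nat :=
  match fuel with
  | 0 => j
  | fuel + 1 =>
    if h : j < cs.length then
      if pvIsIdent (cs[j]) then pvIdentEnd cs fuel (j + 1) else j
    else j

-- the main `while i < len(line)` loop of A (`char` = cs[i] inlined); `result` is the
-- Python list of strings, joined (flattened) by the caller.  cs[i-1] is only read when
-- i ≠ 0 (Python short-circuits `i == 0 or …`), so List.getD is exact there; the slice
-- line[i:j] with 0 ≤ i ≤ j is (drop i).take (j - i), exact.
def pvLoopA (cs old new : List Char) (fuel i : Nat) (inStr : Option Char)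
    (current : List Char) (result : List (List Char)) : List (List Char) :=
  match fuel with
  | 0 => result ++ [current]
  | fuel + 1 =>
    if h : i < cs.length then
      if pvIsQuote (cs[i]) then
        match inStr with
        | none => pvLoopA cs old new fuel (i + 1) (some (cs[i])) (current ++ [cs[i]]) result
        | some q =>
          if q = cs[i] ∧ (i = 0 ∨ cs.getD (i - 1) ' ' ≠ '\\') then
            pvLoopA cs old new fuel (i + 1) none (current ++ [cs[i]]) result
          else
            pvLoopA cs old new fuel (i + 1) (some q) (current ++ [cs[i]]) result
      else if inStr.isSome then
        pvLoopA cs old new fuel (i + 1) inStr (current ++ [cs[i]]) result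
      else if pvIsIdent (cs[i]) then
        -- identifier = line[i:j]; then i = j - 1 and the loop's i += 1 resumes at j
        if (cs.drop i).take (pvIdentEnd cs cs.length i - i) = old then
          pvLoopA cs old new fuel (pvIdentEnd cs cs.length i) none new (result ++ [current])
        else
          pvLoopA cs old new fuel (pvIdentEnd cs cs.length i) none
            (current ++ (cs.drop i).take (pvIdentEnd cs cs.length i - i)) result
      else
        pvLoopA cs old new fuel (i + 1) none (current ++ [cs[i]]) result
    else
      -- result.append(current); return ''.join(result)
      result ++ [current]

def rename_in_line_py (line : String) (old_name : String) (new_name : String) : String :=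
  String.ofList ((pvLoopA line.toList old_name.toList new_name.toList
      line.toList.length 0 none [] []).flatten)

-- ===== PORT B =====
-- port of B's helper _step: quote-state transition for position i
def pvStep (cs : List Char) (i : Nat) (state : Option Char) : Option Char :=
  if h : i < cs.length then
    if pvIsQuote (cs[i]) then
      match state with
      | none => some (cs[i])
      | some q =>
        if q = cs[i] ∧ (i = 0 ∨ cs.getD (i - 1) ' ' ≠ '\\') then none else some q
    else state
  else state

-- pass 1 of B: the `protected` bits from index i onward, given the quote-state there
-- (B's Python fills an array left to right; this produces the same list of bits)
def pvMask (cs : List Char) (fuel i : Nat) (st : Option Char) : List Bool :=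
  match fuel with
  | 0 => []
  | fuel + 1 =>
    if h : i < cs.length then
      (pvIsQuote (cs[i]) || st.isSome) :: pvMask cs fuel (i + 1) (pvStep cs i st)
    else []

-- pass 2 of B: copy protected chars, rewrite unprotected maximal identifier runs
def pvRewrite (cs old new : List Char) (prot : List Bool) (fuel i : Nat)
    (out : List (List Char)) : List (List Char) :=
  match fuel with
  | 0 => out
  | fuel + 1 =>
    if h : i < cs.length then
      if prot.getD i false ∨ ¬ pvIsIdent (cs[i]) then
        pvRewrite cs old new prot fuel (i + 1) (out ++ [[cs[i]]])
      else
        pvRewrite cs old new prot fuel (pvIdentEnd cs cs.length i)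
          (out ++ [if (cs.drop i).take (pvIdentEnd cs cs.length i - i) = old then new
                   else (cs.drop i).take (pvIdentEnd cs cs.length i - i)])
    else out

def rename_in_line_py_alt (line : String) (old_name : String) (new_name : String) : String :=
  String.ofList ((pvRewrite line.toList old_name.toList new_name.toList
      (pvMask line.toList line.toList.length 0 none) line.toList.length 0 []).flatten)

-- ===== PRECONDITION & SPEC =====
def Spec_rename_in_line_py (line : String) (old_name : String) (new_name : String) (out : String) : Prop := out = rename_in_line_py_alt line old_name new_name
instance (line : String) (old_name : String) (new_name : String) (out : String) : Decidable (Spec_rename_in_line_py line old_name new_name out) := by unfold Spec_rename_in_line_py; infer_instance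

-- ===== CLAIM (what is proved, stated in full; the proofs are below) =====
def Claim_equal_rename_in_line_py : Prop := ∀ (line : String) (old_name : String) (new_name : String), Dom_rename_in_line_py line old_name new_name → Spec_rename_in_line_py line old_name new_name (rename_in_line_py line old_name new_name)

-- ===== LEMMAS AND PROOFS =====

theorem ident_not_quote (c : Char) (h : pvIsIdent c = true) : pvIsQuote c = false := by
  by_contra h'
  have hq : pvIsQuote c = true := by simpa using h'
  simp only [pvIsQuote, Bool.or_eq_true, decide_eq_true_eq] at hq
  rcases hq with rfl | rfl <;> exact absurd h (by decide)

-- common description of the output: the chars emitted from index i with quote-state st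
def pvSpecRun (cs old new : List Char) (fuel i : Nat) (st : Option Char) : List Char :=
  match fuel with
  | 0 => []
  | fuel + 1 =>
    if h : i < cs.length then
      if pvIsQuote (cs[i]) || st.isSome then
        cs[i] :: pvSpecRun cs old new fuel (i + 1) (pvStep cs i st)
      else if pvIsIdent (cs[i]) then
        (if (cs.drop i).take (pvIdentEnd cs cs.length i - i) = old then new
         else (cs.drop i).take (pvIdentEnd cs cs.length i - i)) ++
          pvSpecRun cs old new fuel (pvIdentEnd cs cs.length i) none
      else
        cs[i] :: pvSpecRun cs old new fuel (i + 1) none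
    else []

-- A's interleaved loop computes pvSpecRun
theorem loopA_eq (cs old new : List Char) (fuel i : Nat) (st : Option Char)
    (current : List Char) (result : List (List Char)) :
    (pvLoopA cs old new fuel i st current result).flatten
      = result.flatten ++ current ++ pvSpecRun cs old new fuel i st := by
  fun_induction pvLoopA cs old new fuel i st current result with
  | case1 i st current result =>
    simp [pvSpecRun]
  | case2 i current result fuel h hq ih =>
    rw [ih]; simp [pvSpecRun, pvStep, h, hq]
  | case3 i current result fuel h hq q hcond ih =>
    rw [ih]; simp [pvSpecRun, pvStep, h, hq, hcond]
    rw [if_pos (by simpa [List.getD] using hcond.2)]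
  | case4 i current result fuel h hq q hcond ih =>
    rw [ih]; simp [pvSpecRun, pvStep, h, hq]
    rw [if_neg (by simpa [List.getD] using hcond)]
  | case5 i st current result fuel h hq hs ih =>
    rw [ih]; simp [pvSpecRun, pvStep, h, hq, hs]
  | case6 i st current result fuel h hq hs hid heq ih =>
    rw [ih]
    have hst : st = none := Option.not_isSome_iff_eq_none.mp (by simpa using hs)
    subst hst
    simp [pvSpecRun, h, hq, hid, heq]
  | case7 i st current result fuel h hq hs hid heq ih =>
    rw [ih]
    have hst : st = none := Option.not_isSome_iff_eq_none.mp (by simpa using hs)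
    subst hst
    simp [pvSpecRun, h, hq, hid, heq]
  | case8 i st current result fuel h hq hs hid ih =>
    rw [ih]
    have hst : st = none := Option.not_isSome_iff_eq_none.mp (by simpa using hs)
    subst hst
    simp [pvSpecRun, h, hq, hid]
  | case9 i st current result fuel h =>
    simp [pvSpecRun, h]

-- the quote-state of B's first pass just before position i
def pvStateAt (cs : List Char) : Nat → Option Char
  | 0 => none
  | i + 1 => pvStep cs i (pvStateAt cs i)

theorem drop_pvMask (cs : List Char) (i : Nat) (hi : i ≤ cs.length) :
    (pvMask cs cs.length 0 none).drop i
      = pvMask cs (cs.length - i) i (pvStateAt cs i) := by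
  induction i with
  | zero => simp [pvStateAt]
  | succ k ih =>
    have hk : k < cs.length := by omega
    have h1 := ih (by omega)
    have h2 : pvMask cs (cs.length - k) k (pvStateAt cs k)
        = (pvIsQuote (cs[k]) || (pvStateAt cs k).isSome)
            :: pvMask cs (cs.length - (k + 1)) (k + 1) (pvStep cs k (pvStateAt cs k)) := by
      have : cs.length - k = (cs.length - (k + 1)) + 1 := by omega
      rw [this, pvMask]
      simp [hk]
    calc (pvMask cs cs.length 0 none).drop (k + 1)
        = ((pvMask cs cs.length 0 none).drop k).drop 1 := by
          rw [List.drop_drop]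
      _ = pvMask cs (cs.length - (k + 1)) (k + 1) (pvStateAt cs (k + 1)) := by
          rw [h1, h2]; simp [pvStateAt]

theorem pvMask_getD (cs : List Char) (i : Nat) (h : i < cs.length) :
    (pvMask cs cs.length 0 none).getD i false
      = (pvIsQuote (cs[i]) || (pvStateAt cs i).isSome) := by
  have hdrop := drop_pvMask cs i (by omega)
  have h2 : pvMask cs (cs.length - i) i (pvStateAt cs i)
      = (pvIsQuote (cs[i]) || (pvStateAt cs i).isSome)
          :: pvMask cs (cs.length - (i + 1)) (i + 1) (pvStep cs i (pvStateAt cs i)) := by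
    have : cs.length - i = (cs.length - (i + 1)) + 1 := by omega
    rw [this, pvMask]
    simp [h]
  have h3 : (pvMask cs cs.length 0 none)[i]? = ((pvMask cs cs.length 0 none).drop i)[0]? := by
    rw [List.getElem?_drop]; simp
  simp [List.getD, h3, hdrop, h2]

-- an unprotected identifier run keeps the quote-state at `none`
theorem pvStateAt_identEnd (cs : List Char) (fuel i : Nat)
    (hst : pvStateAt cs i = none) :
    pvStateAt cs (pvIdentEnd cs fuel i) = none := by
  fun_induction pvIdentEnd cs fuel i with
  | case1 j => exact hst
  | case2 j fuel h hid ih =>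
    apply ih
    have hnq : pvIsQuote (cs[j]) = false := ident_not_quote _ hid
    show pvStep cs j (pvStateAt cs j) = none
    rw [hst]
    simp [pvStep, h, hnq]
  | case3 j fuel h hid => exact hst
  | case4 j fuel h => exact hst

-- B's second pass computes pvSpecRun
theorem rewriteB_eq (cs old new : List Char) (fuel i : Nat) (out : List (List Char)) :
    (pvRewrite cs old new (pvMask cs cs.length 0 none) fuel i out).flatten
      = out.flatten ++ pvSpecRun cs old new fuel i (pvStateAt cs i) := by
  fun_induction pvRewrite cs old new (pvMask cs cs.length 0 none) fuel i out with
  | case1 i out =>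
    simp [pvSpecRun]
  | case2 i out fuel h hcond ih =>
    rw [ih]
    have hm := pvMask_getD cs i h
    by_cases hb : (pvIsQuote (cs[i]) || (pvStateAt cs i).isSome) = true
    · simp [pvSpecRun, h, hb, pvStateAt]
    · have hbf : (pvIsQuote (cs[i]) || (pvStateAt cs i).isSome) = false := by
        simpa using hb
      rw [Bool.or_eq_false_iff] at hbf
      have hst : pvStateAt cs i = none :=
        Option.not_isSome_iff_eq_none.mp (by simp [hbf.2])
      have hid : pvIsIdent (cs[i]) = false := by
        rcases hcond with hc | hc
        · rw [hm, hbf.1, hst] at hc; simp at hc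
        · simpa using hc
      have hstep : pvStateAt cs (i + 1) = none := by
        show pvStep cs i (pvStateAt cs i) = none
        rw [hst]; simp [pvStep, h, hbf.1]
      rw [hst, hstep]
      simp [pvSpecRun, h, hbf.1, hid]
  | case3 i out fuel h hcond ih =>
    rw [ih]
    have hmfalse : (pvMask cs cs.length 0 none).getD i false = false := by
      by_contra hx
      exact hcond (Or.inl (by simpa using hx))
    have hid : pvIsIdent (cs[i]) = true := by
      by_contra hx; exact hcond (Or.inr hx)
    have hm := pvMask_getD cs i h
    have hmf : (pvIsQuote (cs[i]) || (pvStateAt cs i).isSome) = false := by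
      rw [← hm]; exact hmfalse
    rw [Bool.or_eq_false_iff] at hmf
    have hst : pvStateAt cs i = none :=
      Option.not_isSome_iff_eq_none.mp (by simp [hmf.2])
    have hj : pvStateAt cs (pvIdentEnd cs cs.length i) = none :=
      pvStateAt_identEnd cs cs.length i hst
    rw [hj, hst]
    simp [pvSpecRun, h, hmf.1, hid]
  | case4 i out fuel h =>
    simp [pvSpecRun, h]

-- ===== VERDICT (by name: the statement is the Claim_ definition above) =====
theorem rename_in_line_py_spec : Claim_equal_rename_in_line_py := by
  intro line old_name new_name _
  unfold Spec_rename_in_line_py rename_in_line_py rename_in_line_py_alt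
  rw [loopA_eq, rewriteB_eq]
  simp [pvStateAt]
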